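-- pv_equiv track=rewrite | github.com/keanay/Game_2048 | game2048.py | right_rearranger
-- ===== SOURCE A (Python) =====
-- EMPTYCELL='<>'
--
-- CELLSANDROWSNUM=4
--
-- def right_rearranger(board):
-- 	addtwo=False
-- 	for cell in range(-1*CELLSANDROWSNUM+1,1):
-- 		cell*=-1
-- 		for row in range(CELLSANDROWSNUM):
-- 			if board[row][cell]==EMPTYCELL:
-- 				for nxtcell in range(1,cell+1):
-- 					if board[row][cell-nxtcell]!=EMPTYCELL:
-- 						board[row][cell]=board[row][cell-nxtcell]
-- 						board[row][cell-nxtcell]=EMPTYCELL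
-- 						addtwo=True
-- 						break
-- 	return addtwo
-- ===== SOURCE B (Python) =====
-- EMPTYCELL = '<>'
--
-- CELLSANDROWSNUM = 4
--
-- def right_rearranger(board):
--     addtwo = False
--     for row in range(CELLSANDROWSNUM):
--         tiles = [board[row][i] for i in range(CELLSANDROWSNUM) if board[row][i] != EMPTYCELL]
--         newrow = [EMPTYCELL] * (CELLSANDROWSNUM - len(tiles)) + tiles
--         for i in range(CELLSANDROWSNUM):
--             if newrow[i] != board[row][i]:
--                 board[row][i] = newrow[i]
--                 addtwo = True
--     return addtwo
-- ===== Notes on version B (the rewrite author's own statement) =====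
-- stated objective: simpler
-- what changed: Per row, B builds the compacted row in one filter-and-pad pass (non-empty cells kept in order, left-padded with EMPTYCELL) and writes it back cell by cell, detecting movement by comparison, instead of A's cell-major nested right-to-left pull search over the whole board.
import Mathlib
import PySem

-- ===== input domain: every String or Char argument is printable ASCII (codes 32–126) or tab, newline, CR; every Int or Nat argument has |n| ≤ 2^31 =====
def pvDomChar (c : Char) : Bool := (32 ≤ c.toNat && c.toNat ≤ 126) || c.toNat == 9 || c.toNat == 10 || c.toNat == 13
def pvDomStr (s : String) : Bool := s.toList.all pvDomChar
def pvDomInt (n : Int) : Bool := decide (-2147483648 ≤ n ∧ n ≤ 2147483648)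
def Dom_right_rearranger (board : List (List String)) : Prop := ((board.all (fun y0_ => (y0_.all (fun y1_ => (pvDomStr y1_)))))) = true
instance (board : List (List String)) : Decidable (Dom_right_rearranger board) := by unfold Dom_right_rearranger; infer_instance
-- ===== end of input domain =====

-- B rebuilds each row in one filter-and-pad pass instead of A's cell-major nested pull search
-- (objective: simpler). Both Pythons mutate `board` identically (rightward compaction of the
-- first 4 cells of the first 4 rows); the equivalence proved here is about the returned Bool.

-- ===== PORT A =====
-- A's inner 'for nxtcell in range(1, cell+1): … break' loop, acting on the row list board[row]
-- (Python mutates that row object in place; only this row is touched, so the row-local form is exact).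
def aPull (r : List String) (cell : Int) : List Int → List String × Bool
  | [] => (r, false)
  | n :: rest =>
    if PySem.List.pyGetD r (cell - n) "" ≠ "<>" then
      (PySem.List.pySetD (PySem.List.pySetD r cell (PySem.List.pyGetD r (cell - n) "")) (cell - n) "<>", true)
    else aPull r cell rest

-- body of A's 'for row in range(CELLSANDROWSNUM)' loop; indices are in range under Pre_, so the
-- pyGetD/pySetD defaults are never reached there.
def aStep (st : List (List String) × Bool) (cell row : Int) : List (List String) × Bool :=
  if PySem.List.pyGetD (PySem.List.pyGetD st.1 row []) cell "" = "<>" then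
    let p := aPull (PySem.List.pyGetD st.1 row []) cell (PySem.List.pyRange 1 (cell + 1) 1)
    (PySem.List.pySetD st.1 row p.1, st.2 || p.2)
  else st

def right_rearranger (board : List (List String)) : Bool :=
  ((PySem.List.pyRange (-1 * 4 + 1) 1 1).foldl (fun st cell =>
      (PySem.List.pyRange 0 4 1).foldl (fun st row => aStep st (cell * -1) row) st)
    (board, false)).2

-- ===== PORT B =====
-- body of B's 'for row in range(CELLSANDROWSNUM)' loop: filter the non-empty tiles, left-pad with
-- EMPTYCELL, write back cell by cell, flagging any change.
def bRowStep (st : List (List String) × Bool) (row : Int) : List (List String) × Bool :=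
  let tiles := ((PySem.List.pyRange 0 4 1).map
      (fun i => PySem.List.pyGetD (PySem.List.pyGetD st.1 row []) i "")).filter (fun v => v ≠ "<>")
  let newrow := List.replicate (4 - tiles.length) "<>" ++ tiles
  (PySem.List.pyRange 0 4 1).foldl (fun st2 i =>
    if PySem.List.pyGetD newrow i "" ≠ PySem.List.pyGetD (PySem.List.pyGetD st2.1 row []) i "" then
      (PySem.List.pySetD st2.1 row
        (PySem.List.pySetD (PySem.List.pyGetD st2.1 row []) i (PySem.List.pyGetD newrow i "")), true)
    else st2) st

def right_rearranger_alt (board : List (List String)) : Bool :=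
  ((PySem.List.pyRange 0 4 1).foldl bRowStep (board, false)).2

-- ===== PRECONDITION & SPEC =====
-- Exactly the inputs on which the Python A returns: with fewer than 4 rows, or fewer than 4 cells
-- in one of the first 4 rows, both A and B raise IndexError.
def Pre_right_rearranger (board : List (List String)) : Prop :=
  4 ≤ board.length ∧ ∀ r ∈ board.take 4, 4 ≤ r.length
instance (board : List (List String)) : Decidable (Pre_right_rearranger board) := by
  unfold Pre_right_rearranger; infer_instance

def pvWitness_right_rearranger : List (List String) :=
  [["2", "<>", "2", "<>"], ["<>", "<>", "<>", "<>"], ["4", "4", "4", "4"], ["2", "4", "<>", "8"]]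

def Spec_right_rearranger (board : List (List String)) (out : Bool) : Prop := out = right_rearranger_alt board
instance (board : List (List String)) (out : Bool) : Decidable (Spec_right_rearranger board out) := by
  unfold Spec_right_rearranger; infer_instance

-- ===== CLAIM (what is proved, stated in full; the proofs are below) =====
def Claim_equal_right_rearranger : Prop := ∀ (board : List (List String)), Dom_right_rearranger board → Pre_right_rearranger board → Spec_right_rearranger board (right_rearranger board)

-- ===== LEMMAS AND PROOFS =====

-- A's action of one cell index on one row, as a row-local function.
def rowAct (r : List String) (c : Int) : List String × Bool :=
  if PySem.List.pyGetD r c "" = "<>" then aPull r c (PySem.List.pyRange 1 (c + 1) 1) else (r, false)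

lemma aStep_row0 (r0 r1 r2 r3 : List String) (rest : List (List String)) (fl : Bool) (c : Int) :
    aStep (r0::r1::r2::r3::rest, fl) c 0 = ((rowAct r0 c).1 :: r1::r2::r3::rest, fl || (rowAct r0 c).2) := by
  unfold aStep rowAct; simp [pysem]; split <;> simp
lemma aStep_row1 (r0 r1 r2 r3 : List String) (rest : List (List String)) (fl : Bool) (c : Int) :
    aStep (r0::r1::r2::r3::rest, fl) c 1 = (r0::(rowAct r1 c).1::r2::r3::rest, fl || (rowAct r1 c).2) := by
  unfold aStep rowAct; simp [pysem]; split <;> simp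
lemma aStep_row2 (r0 r1 r2 r3 : List String) (rest : List (List String)) (fl : Bool) (c : Int) :
    aStep (r0::r1::r2::r3::rest, fl) c 2 = (r0::r1::(rowAct r2 c).1::r3::rest, fl || (rowAct r2 c).2) := by
  unfold aStep rowAct; simp [pysem]; split <;> simp
lemma aStep_row3 (r0 r1 r2 r3 : List String) (rest : List (List String)) (fl : Bool) (c : Int) :
    aStep (r0::r1::r2::r3::rest, fl) c 3 = (r0::r1::r2::(rowAct r3 c).1::rest, fl || (rowAct r3 c).2) := by
  unfold aStep rowAct; simp [pysem]; split <;> simp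

-- A's inner row loop for one fixed cell index acts on the four rows independently.
lemma inner_eq (r0 r1 r2 r3 : List String) (rest : List (List String)) (fl : Bool) (c : Int) :
    (PySem.List.pyRange 0 4 1).foldl (fun st row => aStep st c row) (r0::r1::r2::r3::rest, fl)
    = ((rowAct r0 c).1::(rowAct r1 c).1::(rowAct r2 c).1::(rowAct r3 c).1::rest,
       fl || (rowAct r0 c).2 || (rowAct r1 c).2 || (rowAct r2 c).2 || (rowAct r3 c).2) := by
  rw [show PySem.List.pyRange 0 4 1 = [0,1,2,3] from by decide]
  simp only [List.foldl]
  rw [aStep_row0, aStep_row1, aStep_row2, aStep_row3]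

-- A restricted to a single row: fold of rowAct over the (negated) cell indices.
def rowA (cs : List Int) (p : List String × Bool) : List String × Bool :=
  cs.foldl (fun p c => ((rowAct p.1 (c * -1)).1, p.2 || (rowAct p.1 (c * -1)).2)) p

lemma rowA_flag (cs : List Int) (r : List String) (fl : Bool) :
    List.foldl (fun p c => ((rowAct p.1 (c * -1)).1, p.2 || (rowAct p.1 (c * -1)).2)) (r, fl) cs
    = ((List.foldl (fun p c => ((rowAct p.1 (c * -1)).1, p.2 || (rowAct p.1 (c * -1)).2)) (r, false) cs).1,
       fl || (List.foldl (fun p c => ((rowAct p.1 (c * -1)).1, p.2 || (rowAct p.1 (c * -1)).2)) (r, false) cs).2) := by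
  induction cs generalizing r fl with
  | nil => simp
  | cons c cs ih =>
    simp only [List.foldl, Bool.false_or]
    rw [ih _ (fl || (rowAct r (c * -1)).2), ih _ ((rowAct r (c * -1)).2)]
    simp [Bool.or_assoc]

-- loop interchange: A's cell-major double loop equals the per-row folds done independently.
lemma outer_eq (cs : List Int) (r0 r1 r2 r3 : List String) (rest : List (List String)) (fl : Bool) :
    cs.foldl (fun st cell => (PySem.List.pyRange 0 4 1).foldl (fun st row => aStep st (cell * -1) row) st)
      (r0::r1::r2::r3::rest, fl)
    = ((rowA cs (r0, false)).1::(rowA cs (r1, false)).1::(rowA cs (r2, false)).1::(rowA cs (r3, false)).1::rest,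
       fl || (rowA cs (r0, false)).2 || (rowA cs (r1, false)).2 || (rowA cs (r2, false)).2 || (rowA cs (r3, false)).2) := by
  induction cs generalizing r0 r1 r2 r3 fl with
  | nil => simp [rowA]
  | cons c cs ih =>
    simp only [List.foldl]
    rw [inner_eq, ih]
    have e : ∀ r : List String, rowA (c :: cs) (r, false)
        = ((rowA cs ((rowAct r (c * -1)).1, false)).1,
           (rowAct r (c * -1)).2 || (rowA cs ((rowAct r (c * -1)).1, false)).2) := by
      intro r
      simp only [rowA, List.foldl, Bool.false_or]
      exact rowA_flag cs _ _
    rw [e, e, e, e]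
    simp [Bool.or_assoc, Bool.or_comm, Bool.or_left_comm]

lemma A_eq (r0 r1 r2 r3 : List String) (rest : List (List String)) :
    right_rearranger (r0::r1::r2::r3::rest)
    = ((rowA [-3,-2,-1,0] (r0, false)).2 || (rowA [-3,-2,-1,0] (r1, false)).2
       || (rowA [-3,-2,-1,0] (r2, false)).2 || (rowA [-3,-2,-1,0] (r3, false)).2) := by
  unfold right_rearranger
  rw [show PySem.List.pyRange (-1 * 4 + 1) 1 1 = [-3,-2,-1,0] from by decide]
  rw [outer_eq]
  simp

-- B restricted to a single row.
def bTiles (r : List String) : List String :=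
  ((PySem.List.pyRange 0 4 1).map (fun i => PySem.List.pyGetD r i "")).filter (fun v => v ≠ "<>")

def bNewrow (r : List String) : List String :=
  List.replicate (4 - (bTiles r).length) "<>" ++ bTiles r

def bLocStep (newrow : List String) (p : List String × Bool) (i : Int) : List String × Bool :=
  if PySem.List.pyGetD newrow i "" ≠ PySem.List.pyGetD p.1 i "" then
    (PySem.List.pySetD p.1 i (PySem.List.pyGetD newrow i ""), true)
  else p

def rowB (r : List String) : List String × Bool :=
  (PySem.List.pyRange 0 4 1).foldl (bLocStep (bNewrow r)) (r, false)

lemma bRow_flag (nr : List String) (is : List Int) :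
    ∀ (r : List String) (fl : Bool),
    is.foldl (bLocStep nr) (r, fl)
    = ((is.foldl (bLocStep nr) (r, false)).1, fl || (is.foldl (bLocStep nr) (r, false)).2) := by
  induction is with
  | nil => simp
  | cons i is ih =>
    intro r fl
    rw [List.foldl_cons, List.foldl_cons]
    by_cases hc : PySem.List.pyGetD nr i "" ≠ PySem.List.pyGetD r i ""
    · rw [show bLocStep nr (r, fl) i = (PySem.List.pySetD r i (PySem.List.pyGetD nr i ""), true) from by
        simp [bLocStep, if_pos hc]]
      rw [show bLocStep nr (r, false) i = (PySem.List.pySetD r i (PySem.List.pyGetD nr i ""), true) from by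
        simp [bLocStep, if_pos hc]]
      rw [ih _ true]
      simp
    · rw [show bLocStep nr (r, fl) i = (r, fl) from by simp [bLocStep, hc]]
      rw [show bLocStep nr (r, false) i = (r, false) from by simp [bLocStep, hc]]
      exact ih r fl

lemma bInner_row0 (is : List Int) (newrow : List String) :
    ∀ (r0 r1 r2 r3 : List String) (rest : List (List String)) (fl : Bool),
    is.foldl (fun st2 i =>
        if PySem.List.pyGetD newrow i "" ≠ PySem.List.pyGetD (PySem.List.pyGetD st2.1 0 []) i "" then
          (PySem.List.pySetD st2.1 0
            (PySem.List.pySetD (PySem.List.pyGetD st2.1 0 []) i (PySem.List.pyGetD newrow i "")), true)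
        else st2) (r0::r1::r2::r3::rest, fl)
    = ((is.foldl (bLocStep newrow) (r0, fl)).1::r1::r2::r3::rest,
       (is.foldl (bLocStep newrow) (r0, fl)).2) := by
  induction is with
  | nil => simp
  | cons i is ih =>
    intro r0 r1 r2 r3 rest fl
    rw [List.foldl_cons, List.foldl_cons]
    have h1 : PySem.List.pyGetD ((r0::r1::r2::r3::rest) : List (List String)) (0:Int) [] = r0 := by
      simp [pysem]
    rw [h1]
    by_cases hc : PySem.List.pyGetD newrow i "" ≠ PySem.List.pyGetD r0 i ""
    · rw [if_pos hc]
      have h2 : PySem.List.pySetD ((r0::r1::r2::r3::rest) : List (List String)) (0:Int)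
            (PySem.List.pySetD r0 i (PySem.List.pyGetD newrow i ""))
          = (PySem.List.pySetD r0 i (PySem.List.pyGetD newrow i ""))::r1::r2::r3::rest := by
        simp [pysem]
      rw [h2]
      rw [show bLocStep newrow (r0, fl) i
          = (PySem.List.pySetD r0 i (PySem.List.pyGetD newrow i ""), true) from by
        simp [bLocStep, if_pos hc]]
      exact ih _ _ _ _ _ _
    · rw [if_neg hc]
      rw [show bLocStep newrow (r0, fl) i = (r0, fl) from by simp [bLocStep, hc]]
      exact ih _ _ _ _ _ _


lemma bInner_row1 (is : List Int) (newrow : List String) :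
    ∀ (r0 r1 r2 r3 : List String) (rest : List (List String)) (fl : Bool),
    is.foldl (fun st2 i =>
        if PySem.List.pyGetD newrow i "" ≠ PySem.List.pyGetD (PySem.List.pyGetD st2.1 1 []) i "" then
          (PySem.List.pySetD st2.1 1
            (PySem.List.pySetD (PySem.List.pyGetD st2.1 1 []) i (PySem.List.pyGetD newrow i "")), true)
        else st2) (r0::r1::r2::r3::rest, fl)
    = (r0::(is.foldl (bLocStep newrow) (r1, fl)).1::r2::r3::rest,
       (is.foldl (bLocStep newrow) (r1, fl)).2) := by
  induction is with
  | nil => simp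
  | cons i is ih =>
    intro r0 r1 r2 r3 rest fl
    rw [List.foldl_cons, List.foldl_cons]
    have h1 : PySem.List.pyGetD ((r0::r1::r2::r3::rest) : List (List String)) (1:Int) [] = r1 := by
      simp [pysem]
    rw [h1]
    by_cases hc : PySem.List.pyGetD newrow i "" ≠ PySem.List.pyGetD r1 i ""
    · rw [if_pos hc]
      have h2 : PySem.List.pySetD ((r0::r1::r2::r3::rest) : List (List String)) (1:Int)
            (PySem.List.pySetD r1 i (PySem.List.pyGetD newrow i ""))
          = r0::(PySem.List.pySetD r1 i (PySem.List.pyGetD newrow i ""))::r2::r3::rest := by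
        simp [pysem]
      rw [h2]
      rw [show bLocStep newrow (r1, fl) i
          = (PySem.List.pySetD r1 i (PySem.List.pyGetD newrow i ""), true) from by
        simp [bLocStep, if_pos hc]]
      exact ih _ _ _ _ _ _
    · rw [if_neg hc]
      rw [show bLocStep newrow (r1, fl) i = (r1, fl) from by simp [bLocStep, hc]]
      exact ih _ _ _ _ _ _


lemma bInner_row2 (is : List Int) (newrow : List String) :
    ∀ (r0 r1 r2 r3 : List String) (rest : List (List String)) (fl : Bool),
    is.foldl (fun st2 i =>
        if PySem.List.pyGetD newrow i "" ≠ PySem.List.pyGetD (PySem.List.pyGetD st2.1 2 []) i "" then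
          (PySem.List.pySetD st2.1 2
            (PySem.List.pySetD (PySem.List.pyGetD st2.1 2 []) i (PySem.List.pyGetD newrow i "")), true)
        else st2) (r0::r1::r2::r3::rest, fl)
    = (r0::r1::(is.foldl (bLocStep newrow) (r2, fl)).1::r3::rest,
       (is.foldl (bLocStep newrow) (r2, fl)).2) := by
  induction is with
  | nil => simp
  | cons i is ih =>
    intro r0 r1 r2 r3 rest fl
    rw [List.foldl_cons, List.foldl_cons]
    have h1 : PySem.List.pyGetD ((r0::r1::r2::r3::rest) : List (List String)) (2:Int) [] = r2 := by
      simp [pysem]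
    rw [h1]
    by_cases hc : PySem.List.pyGetD newrow i "" ≠ PySem.List.pyGetD r2 i ""
    · rw [if_pos hc]
      have h2 : PySem.List.pySetD ((r0::r1::r2::r3::rest) : List (List String)) (2:Int)
            (PySem.List.pySetD r2 i (PySem.List.pyGetD newrow i ""))
          = r0::r1::(PySem.List.pySetD r2 i (PySem.List.pyGetD newrow i ""))::r3::rest := by
        simp [pysem]
      rw [h2]
      rw [show bLocStep newrow (r2, fl) i
          = (PySem.List.pySetD r2 i (PySem.List.pyGetD newrow i ""), true) from by
        simp [bLocStep, if_pos hc]]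
      exact ih _ _ _ _ _ _
    · rw [if_neg hc]
      rw [show bLocStep newrow (r2, fl) i = (r2, fl) from by simp [bLocStep, hc]]
      exact ih _ _ _ _ _ _


lemma bInner_row3 (is : List Int) (newrow : List String) :
    ∀ (r0 r1 r2 r3 : List String) (rest : List (List String)) (fl : Bool),
    is.foldl (fun st2 i =>
        if PySem.List.pyGetD newrow i "" ≠ PySem.List.pyGetD (PySem.List.pyGetD st2.1 3 []) i "" then
          (PySem.List.pySetD st2.1 3
            (PySem.List.pySetD (PySem.List.pyGetD st2.1 3 []) i (PySem.List.pyGetD newrow i "")), true)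
        else st2) (r0::r1::r2::r3::rest, fl)
    = (r0::r1::r2::(is.foldl (bLocStep newrow) (r3, fl)).1::rest,
       (is.foldl (bLocStep newrow) (r3, fl)).2) := by
  induction is with
  | nil => simp
  | cons i is ih =>
    intro r0 r1 r2 r3 rest fl
    rw [List.foldl_cons, List.foldl_cons]
    have h1 : PySem.List.pyGetD ((r0::r1::r2::r3::rest) : List (List String)) (3:Int) [] = r3 := by
      simp [pysem]
    rw [h1]
    by_cases hc : PySem.List.pyGetD newrow i "" ≠ PySem.List.pyGetD r3 i ""
    · rw [if_pos hc]
      have h2 : PySem.List.pySetD ((r0::r1::r2::r3::rest) : List (List String)) (3:Int)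
            (PySem.List.pySetD r3 i (PySem.List.pyGetD newrow i ""))
          = r0::r1::r2::(PySem.List.pySetD r3 i (PySem.List.pyGetD newrow i ""))::rest := by
        simp [pysem]
      rw [h2]
      rw [show bLocStep newrow (r3, fl) i
          = (PySem.List.pySetD r3 i (PySem.List.pyGetD newrow i ""), true) from by
        simp [bLocStep, if_pos hc]]
      exact ih _ _ _ _ _ _
    · rw [if_neg hc]
      rw [show bLocStep newrow (r3, fl) i = (r3, fl) from by simp [bLocStep, hc]]
      exact ih _ _ _ _ _ _

lemma bStep_row0 (r0 r1 r2 r3 : List String) (rest : List (List String)) (fl : Bool) :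
    bRowStep (r0::r1::r2::r3::rest, fl) 0
    = ((rowB r0).1::r1::r2::r3::rest, fl || (rowB r0).2) := by
  simp only [bRowStep]
  rw [show PySem.List.pyGetD ((r0::r1::r2::r3::rest) : List (List String)) (0:Int) [] = r0 from by
    simp [pysem]]
  rw [bInner_row0]
  rw [bRow_flag]
  simp only [rowB, bNewrow, bTiles]


lemma bStep_row1 (r0 r1 r2 r3 : List String) (rest : List (List String)) (fl : Bool) :
    bRowStep (r0::r1::r2::r3::rest, fl) 1
    = (r0::(rowB r1).1::r2::r3::rest, fl || (rowB r1).2) := by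
  simp only [bRowStep]
  rw [show PySem.List.pyGetD ((r0::r1::r2::r3::rest) : List (List String)) (1:Int) [] = r1 from by
    simp [pysem]]
  rw [bInner_row1]
  rw [bRow_flag]
  simp only [rowB, bNewrow, bTiles]


lemma bStep_row2 (r0 r1 r2 r3 : List String) (rest : List (List String)) (fl : Bool) :
    bRowStep (r0::r1::r2::r3::rest, fl) 2
    = (r0::r1::(rowB r2).1::r3::rest, fl || (rowB r2).2) := by
  simp only [bRowStep]
  rw [show PySem.List.pyGetD ((r0::r1::r2::r3::rest) : List (List String)) (2:Int) [] = r2 from by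
    simp [pysem]]
  rw [bInner_row2]
  rw [bRow_flag]
  simp only [rowB, bNewrow, bTiles]


lemma bStep_row3 (r0 r1 r2 r3 : List String) (rest : List (List String)) (fl : Bool) :
    bRowStep (r0::r1::r2::r3::rest, fl) 3
    = (r0::r1::r2::(rowB r3).1::rest, fl || (rowB r3).2) := by
  simp only [bRowStep]
  rw [show PySem.List.pyGetD ((r0::r1::r2::r3::rest) : List (List String)) (3:Int) [] = r3 from by
    simp [pysem]]
  rw [bInner_row3]
  rw [bRow_flag]
  simp only [rowB, bNewrow, bTiles]

lemma B_eq (r0 r1 r2 r3 : List String) (rest : List (List String)) :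
    right_rearranger_alt (r0::r1::r2::r3::rest)
    = ((rowB r0).2 || (rowB r1).2 || (rowB r2).2 || (rowB r3).2) := by
  unfold right_rearranger_alt
  rw [show PySem.List.pyRange 0 4 1 = [0,1,2,3] from by decide]
  simp only [List.foldl]
  rw [bStep_row0, bStep_row1, bStep_row2, bStep_row3]
  simp

lemma empty_eq_comm (x : String) : ("<>" = x) = (x = "<>") := propext eq_comm

-- small evaluation lemmas on 4-cell cons rows (indices produced by the loops are 0..3).
lemma g0 (w x y z : String) (t : List String) : PySem.List.pyGetD (w::x::y::z::t) (0:Int) "" = w := by simp [pysem]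
lemma g1 (w x y z : String) (t : List String) : PySem.List.pyGetD (w::x::y::z::t) (1:Int) "" = x := by simp [pysem]
lemma g2 (w x y z : String) (t : List String) : PySem.List.pyGetD (w::x::y::z::t) (2:Int) "" = y := by simp [pysem]
lemma g3 (w x y z : String) (t : List String) : PySem.List.pyGetD (w::x::y::z::t) (3:Int) "" = z := by simp [pysem]
lemma s0 (w x y z v : String) (t : List String) : PySem.List.pySetD (w::x::y::z::t) (0:Int) v = v::x::y::z::t := by simp [pysem]
lemma s1 (w x y z v : String) (t : List String) : PySem.List.pySetD (w::x::y::z::t) (1:Int) v = w::v::y::z::t := by simp [pysem]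
lemma s2 (w x y z v : String) (t : List String) : PySem.List.pySetD (w::x::y::z::t) (2:Int) v = w::x::v::z::t := by simp [pysem]
lemma s3 (w x y z v : String) (t : List String) : PySem.List.pySetD (w::x::y::z::t) (3:Int) v = w::x::y::v::t := by simp [pysem]

lemma rowActe (r : List String) (c : Int) :
    rowAct r c = if PySem.List.pyGetD r c "" = "<>" then aPull r c (PySem.List.pyRange 1 (c + 1) 1) else (r, false) := rfl

lemma pr4 : PySem.List.pyRange 1 4 1 = [1,2,3] := by decide
lemma pr3 : PySem.List.pyRange 1 3 1 = [1,2] := by decide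
lemma pr2 : PySem.List.pyRange 1 2 1 = [1] := by decide
lemma pr1 : PySem.List.pyRange 1 1 1 = [] := by decide
lemma pr0 : PySem.List.pyRange 0 4 1 = [0,1,2,3] := by decide

lemma snd_ite {α β : Type} (c : Prop) [Decidable c] (x y : α × β) :
    (if c then x else y).2 = if c then x.2 else y.2 := by
  split <;> rfl

-- the crux: on any 4-cell row, A's pull loop and B's filter-and-pad pass flag movement identically
-- (16-way case split on which cells are empty).
set_option maxHeartbeats 1000000 in
lemma row_eq (a b c d : String) (t : List String) :
    (rowA [-3,-2,-1,0] (a::b::c::d::t, false)).2 = (rowB (a::b::c::d::t)).2 := by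
  by_cases h0 : a = "<>" <;> by_cases h1 : b = "<>" <;> by_cases h2 : c = "<>" <;> by_cases h3 : d = "<>" <;>
  simp only [rowA, rowB, bNewrow, bTiles, bLocStep, List.foldl, rowActe, aPull, pr0, pr4, pr3, pr2, pr1,
    g0, g1, g2, g3, s0, s1, s2, s3, h0, h1, h2, h3, empty_eq_comm,
    Int.reduceNeg, Int.reduceMul, Int.reduceAdd, Int.reduceSub, ne_eq,
    List.map_cons, List.map_nil, List.filter_cons, List.filter_nil, List.length_cons, List.length_nil,
    List.replicate, List.cons_append, List.nil_append, Nat.reduceSub, Nat.reduceAdd,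
    ite_true, ite_false, not_false_eq_true, not_true_eq_false, reduceIte, snd_ite,
    ite_self, Bool.or_true, Bool.or_false, Bool.or_self, decide_true, decide_false, decide_not,
    Bool.not_true, Bool.not_false, Bool.false_eq_true, Bool.true_eq_false]

-- ===== VERDICT (by name: the statement is the Claim_ definition above) =====
theorem right_rearranger_spec : Claim_equal_right_rearranger := by
  intro board _hdom hpre
  unfold Spec_right_rearranger
  obtain ⟨hlen, hrows⟩ := hpre
  rcases board with _ | ⟨r0, _ | ⟨r1, _ | ⟨r2, _ | ⟨r3, rest⟩⟩⟩⟩ <;> simp at hlen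
  have m0 : 4 ≤ r0.length := hrows r0 (by simp)
  have m1 : 4 ≤ r1.length := hrows r1 (by simp)
  have m2 : 4 ≤ r2.length := hrows r2 (by simp)
  have m3 : 4 ≤ r3.length := hrows r3 (by simp)
  rcases r0 with _ | ⟨a0, _ | ⟨b0, _ | ⟨c0, _ | ⟨d0, t0⟩⟩⟩⟩ <;> simp at m0
  rcases r1 with _ | ⟨a1, _ | ⟨b1, _ | ⟨c1, _ | ⟨d1, t1⟩⟩⟩⟩ <;> simp at m1
  rcases r2 with _ | ⟨a2, _ | ⟨b2, _ | ⟨c2, _ | ⟨d2, t2⟩⟩⟩⟩ <;> simp at m2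
  rcases r3 with _ | ⟨a3, _ | ⟨b3, _ | ⟨c3, _ | ⟨d3, t3⟩⟩⟩⟩ <;> simp at m3
  rw [A_eq, B_eq, row_eq, row_eq, row_eq, row_eq]
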